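-- pv_equiv track=rewrite | github.com/chandankumarm55/DSA-Pratice-MCA | Advance/1. Total Sales Calculation.py | calculate_sales
-- ===== SOURCE A (Python) =====
-- def calculate_sales(sales):
--     employees = len(sales)
--     months = len(sales[0])
--
--
--     employee_sales = [0] * employees
--     for i in range(employees):
--         for j in range(months):
--             employee_sales[i] += sales[i][j]
--
--     month_sales = [0] * months
--     for j in range(months):
--         for i in range(employees):
--             month_sales[j] += sales[i][j]
--
--     total_sales = 0
--     for emp_total in employee_sales:
--         total_sales += emp_total
--
--     return employee_sales, month_sales, total_sales
-- ===== SOURCE B (Python) =====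
-- def calculate_sales(sales):
--     months = len(sales[0])
--     employee_sales = []
--     month_sales = [0] * months
--     for row in sales:
--         employee_sales.append(sum(row[:months]))
--         month_sales = [m + row[j] for j, m in enumerate(month_sales)]
--     return employee_sales, month_sales, sum(month_sales)
-- ===== Notes on version B (the rewrite author's own statement) =====
-- stated objective: alternative
-- what changed: A streaming single pass over the rows: a column-accumulator vector is rebuilt by elementwise addition of each row (no indexing into sales by row number, no pre-sized mutable result arrays), and the grand total is derived from the column sums instead of the row sums.
import Mathlib
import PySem

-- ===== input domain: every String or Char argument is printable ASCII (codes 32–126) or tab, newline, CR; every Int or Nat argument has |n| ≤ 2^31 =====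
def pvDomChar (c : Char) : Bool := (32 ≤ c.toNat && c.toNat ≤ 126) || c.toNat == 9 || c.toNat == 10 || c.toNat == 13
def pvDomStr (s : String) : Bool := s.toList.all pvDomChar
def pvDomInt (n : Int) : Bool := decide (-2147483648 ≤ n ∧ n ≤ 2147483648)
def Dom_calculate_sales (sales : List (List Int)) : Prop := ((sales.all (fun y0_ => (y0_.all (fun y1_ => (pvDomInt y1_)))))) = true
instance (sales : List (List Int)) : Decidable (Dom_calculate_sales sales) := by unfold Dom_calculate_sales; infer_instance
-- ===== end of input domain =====

-- B replaces A's three index-driven loop nests by one streaming pass over the rows,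
-- rebuilding a column-accumulator vector by elementwise addition of each row and
-- deriving the grand total from the column sums; same cost ('alternative').

-- ===== PORT A =====
def calculate_sales (sales : List (List Int)) : List Int × List Int × Int :=
  let employees : Int := sales.length
  let months : Int := (PySem.List.pyGetD sales 0 []).length
  let employee_sales : List Int :=
    (PySem.List.pyRange 0 employees 1).foldl (fun es i =>
      (PySem.List.pyRange 0 months 1).foldl (fun es j =>
        es.set i.toNat (es.getD i.toNat 0 + PySem.List.pyGetD (PySem.List.pyGetD sales i []) j 0)) es)
      (List.replicate employees.toNat 0)
  let month_sales : List Int :=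
    (PySem.List.pyRange 0 months 1).foldl (fun ms j =>
      (PySem.List.pyRange 0 employees 1).foldl (fun ms i =>
        ms.set j.toNat (ms.getD j.toNat 0 + PySem.List.pyGetD (PySem.List.pyGetD sales i []) j 0)) ms)
      (List.replicate months.toNat 0)
  let total_sales : Int := employee_sales.foldl (fun acc x => acc + x) 0
  (employee_sales, month_sales, total_sales)

-- ===== PORT B =====
def calculate_sales_alt (sales : List (List Int)) : List Int × List Int × Int :=
  let months : Int := (PySem.List.pyGetD sales 0 []).length
  let st : List Int × List Int :=
    sales.foldl (fun (st : List Int × List Int) row =>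
        (st.1 ++ [(PySem.List.slice row none (some months)).sum],
         (PySem.List.enumerate st.2).map (fun p => p.2 + PySem.List.pyGetD row p.1 0)))
      ([], List.replicate months.toNat 0)
  (st.1, st.2, st.2.sum)

-- ===== PRECONDITION & SPEC =====
-- Pre_ excludes exactly the inputs on which Python A raises IndexError: the empty list
-- (sales[0] fails) and jagged inputs with a row shorter than the first row (sales[i][j] fails).
def Pre_calculate_sales (sales : List (List Int)) : Prop :=
  sales ≠ [] ∧ ∀ row ∈ sales, (PySem.List.pyGetD sales 0 []).length ≤ row.length
instance (sales : List (List Int)) : Decidable (Pre_calculate_sales sales) := by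
  unfold Pre_calculate_sales; infer_instance

def pvWitness_calculate_sales : List (List Int) := [[1, 2], [3, 4]]

def Spec_calculate_sales (sales : List (List Int)) (out : List Int × List Int × Int) : Prop := out = calculate_sales_alt sales
instance (sales : List (List Int)) (out : List Int × List Int × Int) : Decidable (Spec_calculate_sales sales out) := by unfold Spec_calculate_sales; infer_instance

-- ===== CLAIM (what is proved, stated in full; the proofs are below) =====
def Claim_equal_calculate_sales : Prop := ∀ (sales : List (List Int)), Dom_calculate_sales sales → Pre_calculate_sales sales → Spec_calculate_sales sales (calculate_sales sales)

-- ===== LEMMAS AND PROOFS =====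

-- A's inner loop touches only index i of the accumulator list: it collapses to one `set`.
theorem pv_setfold (l : List Int) (g : Int → Int) (es : List Int) (i : Nat) :
    l.foldl (fun es j => es.set i (es.getD i 0 + g j)) es
      = es.set i (es.getD i 0 + (l.map g).sum) := by
  induction l generalizing es with
  | nil =>
    simp only [List.foldl_nil, List.map_nil, List.sum_nil, add_zero]
    by_cases h : i < es.length
    · rw [List.getD_eq_getElem es 0 h]
      exact (List.set_getElem_self h).symm
    · rw [List.set_eq_of_length_le (by omega)]
  | cons a t ih =>
    simp only [List.foldl_cons, List.map_cons, List.sum_cons]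
    rw [ih]
    by_cases h : i < es.length
    · have hg : (es.set i (es.getD i 0 + g a)).getD i 0 = es.getD i 0 + g a := by
        rw [List.getD_eq_getElem?_getD, List.getElem?_set_self h]
        rfl
      rw [hg, List.set_set, add_assoc]
    · have hle : es.length ≤ i := by omega
      simp [List.set_eq_of_length_le hle]

-- Filling a zero-initialised list index by index produces the map of the fill function.
theorem pv_fillfold (m n : Nat) (f : Nat → Int) (hmn : m ≤ n) :
    (List.range m).foldl (fun es i => es.set i (es.getD i 0 + f i)) (List.replicate n 0)
      = (List.range m).map f ++ List.replicate (n - m) 0 := by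
  induction m with
  | zero => simp
  | succ m ih =>
    rw [List.range_succ, List.foldl_append, ih (by omega), List.map_append]
    simp only [List.foldl_cons, List.foldl_nil, List.map_cons, List.map_nil]
    have hrep : List.replicate (n - m) (0 : Int) = 0 :: List.replicate (n - (m + 1)) 0 := by
      rw [show n - m = (n - (m + 1)) + 1 by omega]; rfl
    rw [hrep]
    set L : List Int := (List.range m).map f with hL
    have hLlen : L.length = m := by simp [hL]
    set R : List Int := List.replicate (n - (m + 1)) (0 : Int) with hR
    have hget : (L ++ 0 :: R).getD m 0 = 0 := by
      rw [List.getD_eq_getElem?_getD, List.getElem?_append_right (by omega), hLlen, Nat.sub_self]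
      rfl
    have hset : ∀ v : Int, (L ++ 0 :: R).set m v = L ++ v :: R := by
      intro v
      conv_lhs => rw [show m = L.length from hLlen.symm]
      rw [List.set_append_right _ _ (le_refl _), Nat.sub_self]
      rfl
    rw [hget, hset, zero_add]
    simp

-- The first `m` entries of a row, read by Python indexing, are `row.take m`.
theorem pv_row_take (row : List Int) (m : Nat) (h : m ≤ row.length) :
    (PySem.List.pyRange 0 (m : Int) 1).map (fun j => PySem.List.pyGetD row j 0)
      = row.take m := by
  have ht : (row.take m).length = m := by simp [h]
  have : (PySem.List.pyRange 0 (m : Int) 1).map (fun j => PySem.List.pyGetD row j 0)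
      = (PySem.List.pyRange 0 (m : Int) 1).map (fun j => PySem.List.pyGetD (row.take m) j 0) := by
    apply List.map_congr_left
    intro j hj
    rw [PySem.List.mem_pyRange_one] at hj
    obtain ⟨k, rfl⟩ : ∃ k : Nat, j = (k : Int) := ⟨j.toNat, (Int.toNat_of_nonneg hj.1).symm⟩
    have hk : k < m := by exact_mod_cast hj.2
    rw [PySem.List.pyGetD_natCast, PySem.List.pyGetD_natCast]
    rw [List.getD_eq_getElem?_getD, List.getD_eq_getElem?_getD]
    rw [List.getElem?_take_of_lt hk]
  rw [this]
  have h2 := PySem.List.map_pyGetD_pyRange_zero (row.take m) 0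
  simp only [PySem.List.len] at h2
  rw [ht] at h2
  exact h2

-- sum distributes over a pointwise sum of two mapped functions
theorem pv_sum_map_add {α : Type} (l : List α) (f h : α → Int) :
    (l.map (fun x => f x + h x)).sum = (l.map f).sum + (l.map h).sum := by
  induction l with
  | nil => simp
  | cons a t ih => simp only [List.map_cons, List.sum_cons, ih]; ring

-- exchanging the two summations (rows vs columns)
theorem pv_sum_swap {α β : Type} (l : List α) (L : List β) (g : α → β → Int) :
    (l.map (fun j => (L.map (g j)).sum)).sum
      = (L.map (fun x => (l.map (fun j => g j x)).sum)).sum := by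
  induction L with
  | nil => simp
  | cons x xs ih =>
    simp only [List.map_cons, List.sum_cons]
    rw [← ih, ← pv_sum_map_add]

-- B's elementwise row-add step, characterised pointwise
theorem pv_colmap_getD (mon row : List Int) (k : Nat) (hk : k < mon.length) :
    ((PySem.List.enumerate mon).map (fun p => p.2 + PySem.List.pyGetD row p.1 0)).getD k 0
      = mon.getD k 0 + PySem.List.pyGetD row (k : Int) 0 := by
  have hlen : (PySem.List.enumerate mon).length = mon.length := by
    simp [PySem.List.length_enumerate]
  rw [List.getD_eq_getElem _ 0 (by simpa [hlen] using hk),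
      List.getD_eq_getElem mon 0 hk]
  simp [PySem.List.getElem_enumerate]

-- folding B's step over the rows yields the column sums shifted by the initial accumulator
theorem pv_colfold (L : List (List Int)) (mon : List Int) :
    L.foldl (fun mon row => (PySem.List.enumerate mon).map (fun p => p.2 + PySem.List.pyGetD row p.1 0)) mon
      = (List.range mon.length).map (fun k =>
          mon.getD k 0 + (L.map (fun row => PySem.List.pyGetD row (k : Int) 0)).sum) := by
  induction L generalizing mon with
  | nil =>
    simp only [List.foldl_nil, List.map_nil, List.sum_nil, add_zero]
    apply List.ext_getElem (by simp)
    intro k h1 h2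
    have hk : k < mon.length := h1
    simp [List.getElem?_eq_getElem hk]
  | cons r rs ih =>
    simp only [List.foldl_cons]
    rw [ih]
    have hlen : ((PySem.List.enumerate mon).map (fun p => p.2 + PySem.List.pyGetD r p.1 0)).length
        = mon.length := by simp [PySem.List.length_enumerate]
    rw [hlen]
    apply List.map_congr_left
    intro k hk
    rw [List.mem_range] at hk
    rw [pv_colmap_getD mon r k hk]
    simp only [List.map_cons, List.sum_cons]
    ring

-- the first component of B's fold accumulates the row sums in order
theorem pv_empfold (L : List (List Int)) (m : Int) (emp mon : List Int) :
    (L.foldl (fun (st : List Int × List Int) row =>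
        (st.1 ++ [(PySem.List.slice row none (some m)).sum],
         (PySem.List.enumerate st.2).map (fun p => p.2 + PySem.List.pyGetD row p.1 0)))
      (emp, mon)).1
      = emp ++ L.map (fun row => (PySem.List.slice row none (some m)).sum) := by
  induction L generalizing emp mon with
  | nil => simp
  | cons r rs ih => simp [List.foldl_cons, ih]

-- the second component of B's fold is the fold of the elementwise step alone
theorem pv_monfold (L : List (List Int)) (m : Int) (emp mon : List Int) :
    (L.foldl (fun (st : List Int × List Int) row =>
        (st.1 ++ [(PySem.List.slice row none (some m)).sum],
         (PySem.List.enumerate st.2).map (fun p => p.2 + PySem.List.pyGetD row p.1 0)))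
      (emp, mon)).2
      = L.foldl (fun mon row => (PySem.List.enumerate mon).map (fun p => p.2 + PySem.List.pyGetD row p.1 0)) mon := by
  induction L generalizing emp mon with
  | nil => simp
  | cons r rs ih => simp [List.foldl_cons, ih]

theorem calculate_sales_eq (sales : List (List Int)) (hpre : Pre_calculate_sales sales) :
    calculate_sales sales = calculate_sales_alt sales := by
  obtain ⟨hne, hrows⟩ := hpre
  unfold calculate_sales calculate_sales_alt
  simp only []
  set M : Nat := (PySem.List.pyGetD sales 0 []).length with hM
  set E : Nat := sales.length with hE
  have hMcast : ((PySem.List.pyGetD sales 0 []).length : Int) = (M : Int) := rfl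
  -- employee_sales
  have hemp :
      (PySem.List.pyRange 0 (E : Int) 1).foldl (fun es i =>
        (PySem.List.pyRange 0 (M : Int) 1).foldl (fun es j =>
          es.set i.toNat (es.getD i.toNat 0 + PySem.List.pyGetD (PySem.List.pyGetD sales i []) j 0)) es)
        (List.replicate (E : Int).toNat 0)
      = sales.map (fun row => (PySem.List.slice row none (some (M : Int))).sum) := by
    have hstep : ∀ (es : List Int) (i : Int),
        (PySem.List.pyRange 0 (M : Int) 1).foldl (fun es j =>
          es.set i.toNat (es.getD i.toNat 0 + PySem.List.pyGetD (PySem.List.pyGetD sales i []) j 0)) es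
        = es.set i.toNat (es.getD i.toNat 0 +
            ((PySem.List.pyRange 0 (M : Int) 1).map (fun j => PySem.List.pyGetD (PySem.List.pyGetD sales i []) j 0)).sum) := by
      intro es i; exact pv_setfold _ _ es i.toNat
    rw [PySem.List.foldl_congr_mem _ _ _ _ (fun es i _ => hstep es i)]
    rw [PySem.List.pyRange_zero_nat E, List.foldl_map]
    simp only [Int.toNat_natCast]
    rw [pv_fillfold E E _ (le_refl E)]
    simp only [Nat.sub_self, List.replicate_zero, List.append_nil]
    apply List.ext_getElem (by simp [hE])
    intro k h1 h2
    simp only [List.getElem_map, List.getElem_range]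
    have hkE : k < sales.length := by simpa [hE] using h2
    have hrow : PySem.List.pyGetD sales (k : Int) [] = sales[k] := by
      rw [PySem.List.pyGetD_natCast, List.getD_eq_getElem?_getD, List.getElem?_eq_getElem hkE]; rfl
    rw [hrow, pv_row_take sales[k] M (hrows _ (List.getElem_mem hkE))]
    rw [PySem.List.slice_to _ (by positivity), Int.toNat_natCast]
  -- A's month_sales in canonical form
  have hmon :
      (PySem.List.pyRange 0 (M : Int) 1).foldl (fun ms j =>
        (PySem.List.pyRange 0 (E : Int) 1).foldl (fun ms i =>
          ms.set j.toNat (ms.getD j.toNat 0 + PySem.List.pyGetD (PySem.List.pyGetD sales i []) j 0)) ms)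
        (List.replicate (M : Int).toNat 0)
      = (PySem.List.pyRange 0 (M : Int) 1).map (fun j =>
          (sales.map (fun row => PySem.List.pyGetD row j 0)).sum) := by
    have hcol : ∀ (j : Int),
        (PySem.List.pyRange 0 (E : Int) 1).map (fun i => PySem.List.pyGetD (PySem.List.pyGetD sales i []) j 0)
        = sales.map (fun row => PySem.List.pyGetD row j 0) := by
      intro j
      have h1 : (PySem.List.pyRange 0 (E : Int) 1).map
            (fun i => PySem.List.pyGetD (PySem.List.pyGetD sales i []) j 0)
          = (PySem.List.pyRange 0 (E : Int) 1).map
            (fun i => PySem.List.pyGetD (sales.map (fun row => PySem.List.pyGetD row j 0)) i 0) := by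
        apply List.map_congr_left
        intro i hi
        rw [PySem.List.mem_pyRange_one] at hi
        obtain ⟨k, rfl⟩ : ∃ k : Nat, i = (k : Int) := ⟨i.toNat, (Int.toNat_of_nonneg hi.1).symm⟩
        have hk : k < sales.length := by exact_mod_cast hi.2
        rw [PySem.List.pyGetD_natCast, PySem.List.pyGetD_natCast]
        rw [List.getD_eq_getElem?_getD, List.getD_eq_getElem?_getD]
        rw [List.getElem?_eq_getElem hk, List.getElem?_eq_getElem (by simpa using hk)]
        simp
      rw [h1]
      have := PySem.List.map_pyGetD_pyRange_zero (sales.map (fun row => PySem.List.pyGetD row j 0)) 0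
      simp only [PySem.List.len, List.length_map] at this
      rw [← hE] at this
      exact this
    have hstep : ∀ (ms : List Int) (j : Int),
        (PySem.List.pyRange 0 (E : Int) 1).foldl (fun ms i =>
          ms.set j.toNat (ms.getD j.toNat 0 + PySem.List.pyGetD (PySem.List.pyGetD sales i []) j 0)) ms
        = ms.set j.toNat (ms.getD j.toNat 0 +
            ((sales.map (fun row => PySem.List.pyGetD row j 0)).sum)) := by
      intro ms j
      rw [pv_setfold _ _ ms j.toNat, hcol j]
    rw [PySem.List.foldl_congr_mem _ _ _ _ (fun ms j _ => hstep ms j)]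
    rw [PySem.List.pyRange_zero_nat M, List.foldl_map, List.map_map]
    simp only [Int.toNat_natCast]
    exact pv_fillfold M M _ (le_refl M) |>.trans (by simp)
  -- B's fold, componentwise
  have hB1 := pv_empfold sales ((M : Nat) : Int) [] (List.replicate ((M : Nat) : Int).toNat 0)
  have hB2 := pv_monfold sales ((M : Nat) : Int) [] (List.replicate ((M : Nat) : Int).toNat 0)
  have hBmon :
      sales.foldl (fun mon row => (PySem.List.enumerate mon).map (fun p => p.2 + PySem.List.pyGetD row p.1 0))
        (List.replicate ((M : Nat) : Int).toNat 0)
      = (PySem.List.pyRange 0 (M : Int) 1).map (fun j =>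
          (sales.map (fun row => PySem.List.pyGetD row j 0)).sum) := by
    rw [pv_colfold]
    simp only [Int.toNat_natCast, List.length_replicate]
    rw [PySem.List.pyRange_zero_nat M, List.map_map]
    apply List.map_congr_left
    intro k hk
    simp
  -- the grand totals agree: sum over rows = sum over columns
  have htot :
      (sales.map (fun row => (PySem.List.slice row none (some (M : Int))).sum)).sum
      = ((PySem.List.pyRange 0 (M : Int) 1).map (fun j =>
          (sales.map (fun row => PySem.List.pyGetD row j 0)).sum)).sum := by
    rw [pv_sum_swap]
    apply congrArg
    apply List.map_congr_left
    intro row hrow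
    rw [pv_row_take row M (hrows _ hrow), PySem.List.slice_to _ (by positivity), Int.toNat_natCast]
  rw [hMcast, hemp, hmon, hB1, hB2, hBmon, PySem.List.foldl_add _ (fun x => x) 0]
  simp only [List.nil_append, zero_add, List.map_id']
  exact Prod.ext rfl (Prod.ext rfl htot)

-- ===== VERDICT (by name: the statement is the Claim_ definition above) =====
theorem calculate_sales_spec : Claim_equal_calculate_sales := by
  intro sales _ hpre
  unfold Spec_calculate_sales
  exact calculate_sales_eq sales hpre
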